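-- pv_equiv track=rewrite | github.com/AeluApp/mandarin | mandarin/tone_grading.py | _apply_sandhi_rules
-- ===== SOURCE A (Python) =====
-- from typing import List, Optional, Tuple
--
-- def _apply_sandhi_rules(tones: List[int]) -> Tuple[List[int], List[int], List[bool]]:
--     """Apply Mandarin tone sandhi rules to expected tones.
--
--     Rules applied:
--     1. Third-tone sandhi: tone 3 before tone 3 becomes tone 2
--        e.g., 你好 nǐ hǎo → ní hǎo (expected [3,3] → [2,3])
--     2. Sequential third tones: in chains of 3+, all but last become tone 2
--        e.g., 我也好 wǒ yě hǎo → wó yé hǎo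
--     3. Tone 3 before non-tone-3 → half-third expected (internal marker)
--
--     Note: 一 and 不 sandhi are handled at the pinyin level (pinyin_to_tones
--     already extracts the surface tone from tone-marked pinyin).
--
--     Returns:
--         (surface_tones, underlying_tones, half_third_markers)
--         - surface_tones: what the speaker should produce
--         - underlying_tones: citation/dictionary form (unchanged input)
--         - half_third_markers: True where half-third realization is acceptable
--     """
--     underlying = list(tones)
--     surface = list(tones)
--     half_third = [False] * len(tones)
--
--     if len(tones) < 2:
--         return (surface, underlying, half_third)
--
--     # Third-tone sandhi: consecutive T3 runs → all but last become T2
--     i = 0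
--     while i < len(surface):
--         if surface[i] == 3:
--             run_end = i + 1
--             while run_end < len(surface) and surface[run_end] == 3:
--                 run_end += 1
--             for j in range(i, run_end - 1):
--                 surface[j] = 2
--             i = run_end
--         else:
--             i += 1
--
--     # Mark T3 before non-T3 as half-third expected
--     for i in range(len(underlying)):
--         if underlying[i] == 3 and i < len(underlying) - 1 and underlying[i + 1] != 3:
--             half_third[i] = True
--
--     return (surface, underlying, half_third)
-- ===== SOURCE B (Python) =====
-- from typing import List, Tuple
--
-- def _apply_sandhi_rules(tones: List[int]) -> Tuple[List[int], List[int], List[bool]]: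
--     n = len(tones)
--     surface = [2 if t == 3 and i + 1 < n and tones[i + 1] == 3 else t
--                for i, t in enumerate(tones)]
--     half_third = [t == 3 and i + 1 < n and tones[i + 1] != 3
--                   for i, t in enumerate(tones)]
--     return (surface, list(tones), half_third)
-- ===== Notes on version B (the rewrite author's own statement) =====
-- stated objective: simpler
-- what changed: Replaces the run-detecting outer/inner while loops that rewrite the surface list in place with a single local rule applied per index (surface[i]=2 iff tones[i]==3 and tones[i+1]==3), computed straight from the unmutated input, with the len<2 case falling out of the no-neighbour condition.
import Mathlib
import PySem

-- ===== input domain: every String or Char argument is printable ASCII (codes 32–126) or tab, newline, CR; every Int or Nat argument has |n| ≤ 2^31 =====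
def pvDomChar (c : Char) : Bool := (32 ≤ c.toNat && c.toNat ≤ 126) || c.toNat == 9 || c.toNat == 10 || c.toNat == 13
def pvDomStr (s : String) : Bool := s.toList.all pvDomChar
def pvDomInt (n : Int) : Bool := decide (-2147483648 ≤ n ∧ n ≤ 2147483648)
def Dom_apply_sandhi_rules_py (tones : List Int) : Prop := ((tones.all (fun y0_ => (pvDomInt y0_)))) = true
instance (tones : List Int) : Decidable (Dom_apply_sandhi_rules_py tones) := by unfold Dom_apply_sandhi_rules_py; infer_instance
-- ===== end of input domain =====

-- B replaces A's run-detecting while loops (mutating surface in place) by one local rule per index;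
-- equivalence of the return values is proved for all inputs (A is total).

-- ===== PORT A =====
-- inner while: run_end scans forward over consecutive 3s; structural recursion on a fuel
-- that is at least the number of remaining indices (the loop body is the literal while body)
def runEndAF (fuel : Nat) (s : List Int) (k : Nat) : Nat :=
  match fuel with
  | 0 => k
  | fuel + 1 => if k < s.length ∧ s.getD k 0 = 3 then runEndAF fuel s (k + 1) else k

def runEndA (s : List Int) (k : Nat) : Nat := runEndAF (s.length - k) s k

-- for j in range(i, stop): surface[j] = 2   (structural recursion on the trip count)
def setRangeAF (s : List Int) (i n : Nat) : List Int :=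
  match n with
  | 0 => s
  | n + 1 => setRangeAF (s.set i 2) (i + 1) n

def setRangeA (s : List Int) (i stop : Nat) : List Int := setRangeAF s i (stop - i)

-- outer while over i, rewriting runs of 3s (fuel ≥ number of remaining indices)
def loopAF (fuel : Nat) (s : List Int) (i : Nat) : List Int :=
  match fuel with
  | 0 => s
  | fuel + 1 =>
    if i < s.length then
      if s.getD i 0 = 3 then
        loopAF fuel (setRangeA s i (runEndA s (i + 1) - 1)) (runEndA s (i + 1))
      else loopAF fuel s (i + 1)
    else s

def loopA (s : List Int) (i : Nat) : List Int := loopAF (s.length - i) s i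

def apply_sandhi_rules_py (tones : List Int) : List Int × List Int × List Bool :=
  let underlying := tones
  let surface := tones
  let half_third := List.replicate tones.length false
  if tones.length < 2 then (surface, underlying, half_third)
  else
    let surface := loopA surface 0
    let half_third := (List.range underlying.length).foldl
      (fun hf i =>
        if underlying.getD i 0 = 3 ∧ i < underlying.length - 1 ∧ underlying.getD (i + 1) 0 ≠ 3
        then hf.set i true else hf) half_third
    (surface, underlying, half_third)

-- ===== PORT B =====
def apply_sandhi_rules_py_alt (tones : List Int) : List Int × List Int × List Bool :=
  let n : Int := tones.length
  let surface := (PySem.List.enumerate tones).map (fun p =>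
      if p.2 = 3 ∧ p.1 + 1 < n ∧ PySem.List.pyGetD tones (p.1 + 1) 0 = 3 then 2 else p.2)
  let half_third := (PySem.List.enumerate tones).map (fun p =>
      decide (p.2 = 3 ∧ p.1 + 1 < n ∧ PySem.List.pyGetD tones (p.1 + 1) 0 ≠ 3))
  (surface, tones, half_third)

-- ===== PRECONDITION & SPEC =====
def Spec_apply_sandhi_rules_py (tones : List Int) (out : List Int × List Int × List Bool) : Prop := out = apply_sandhi_rules_py_alt tones
instance (tones : List Int) (out : List Int × List Int × List Bool) : Decidable (Spec_apply_sandhi_rules_py tones out) := by unfold Spec_apply_sandhi_rules_py; infer_instance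

-- ===== CLAIM (what is proved, stated in full; the proofs are below) =====
def Claim_equal_apply_sandhi_rules_py : Prop := ∀ (tones : List Int), Dom_apply_sandhi_rules_py tones → Spec_apply_sandhi_rules_py tones (apply_sandhi_rules_py tones)

-- ===== LEMMAS AND PROOFS =====

-- target value of the surface list at index j (the local rule B applies)
def tgtS (tones : List Int) (j : Nat) : Int :=
  if tones.getD j 0 = 3 ∧ j + 1 < tones.length ∧ tones.getD (j + 1) 0 = 3 then 2 else tones.getD j 0

theorem ext_getD {α : Type} (d : α) (l₁ l₂ : List α) (h : l₁.length = l₂.length)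
    (hj : ∀ j, j < l₁.length → l₁.getD j d = l₂.getD j d) : l₁ = l₂ := by
  apply List.ext_getElem h
  intro j h1 h2
  have := hj j h1
  simpa [List.getD_eq_getElem?_getD, List.getElem?_eq_getElem, h1, h2] using this

theorem getD_set_eq {α : Type} (d v : α) (l : List α) (i j : Nat) :
    (l.set i v).getD j d = if i = j ∧ i < l.length then v else l.getD j d := by
  rw [List.getD_eq_getElem?_getD, List.getD_eq_getElem?_getD, List.getElem?_set]
  by_cases h1 : i = j
  · by_cases h2 : i < l.length
    · subst h1
      simp [h2]
    · subst h1
      rw [if_pos rfl, if_neg h2, if_neg (by rintro ⟨-, hb⟩; exact h2 hb)]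
      rw [List.getElem?_eq_none_iff.mpr (by omega)]
  · rw [if_neg h1, if_neg (by rintro ⟨ha, -⟩; exact h1 ha)]

theorem runEndAF_ge (fuel : Nat) (s : List Int) (k : Nat) : k ≤ runEndAF fuel s k := by
  induction fuel generalizing k with
  | zero => simp [runEndAF]
  | succ fuel ih =>
      simp only [runEndAF]
      split
      · exact le_trans (by omega) (ih (k + 1))
      · exact le_rfl

theorem runEndA_ge (s : List Int) (k : Nat) : k ≤ runEndA s k := runEndAF_ge _ s k

theorem runEndAF_spec (fuel : Nat) (s : List Int) (k : Nat) (hf : s.length ≤ k + fuel) :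
    (∀ j, k ≤ j → j < runEndAF fuel s k → j < s.length ∧ s.getD j 0 = 3) ∧
    ¬(runEndAF fuel s k < s.length ∧ s.getD (runEndAF fuel s k) 0 = 3) := by
  induction fuel generalizing k with
  | zero =>
      simp only [runEndAF]
      exact ⟨fun j hj1 hj2 => absurd hj2 (by omega), by rintro ⟨ha, -⟩; omega⟩
  | succ fuel ih =>
      simp only [runEndAF]
      by_cases h : k < s.length ∧ s.getD k 0 = 3
      · rw [if_pos h]
        obtain ⟨ih1, ih2⟩ := ih (k + 1) (by omega)
        refine ⟨?_, ih2⟩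
        intro j hj1 hj2
        rcases Nat.eq_or_lt_of_le hj1 with rfl | hlt
        · exact h
        · exact ih1 j hlt hj2
      · rw [if_neg h]
        exact ⟨fun j hj1 hj2 => absurd hj2 (by omega), h⟩

theorem runEndA_spec (s : List Int) (k : Nat) :
    (∀ j, k ≤ j → j < runEndA s k → j < s.length ∧ s.getD j 0 = 3) ∧
    ¬(runEndA s k < s.length ∧ s.getD (runEndA s k) 0 = 3) :=
  runEndAF_spec (s.length - k) s k (by omega)

theorem setRangeAF_length (s : List Int) (i n : Nat) : (setRangeAF s i n).length = s.length := by
  induction n generalizing s i with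
  | zero => rfl
  | succ n ih => rw [setRangeAF, ih, List.length_set]

theorem setRangeA_length (s : List Int) (i stop : Nat) : (setRangeA s i stop).length = s.length :=
  setRangeAF_length s i _

theorem setRangeAF_getD (s : List Int) (i n j : Nat) :
    (setRangeAF s i n).getD j 0 =
      if i ≤ j ∧ j < i + n ∧ j < s.length then 2 else s.getD j 0 := by
  induction n generalizing s i with
  | zero =>
      rw [setRangeAF]
      split <;> omega
  | succ n ih =>
      rw [setRangeAF, ih, getD_set_eq]
      simp only [List.length_set]
      split_ifs <;> omega

theorem setRangeA_getD (s : List Int) (i stop j : Nat) :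
    (setRangeA s i stop).getD j 0 =
      if i ≤ j ∧ j < stop ∧ j < s.length then 2 else s.getD j 0 := by
  rw [setRangeA, setRangeAF_getD]
  split_ifs <;> omega

theorem loopAF_length (fuel : Nat) (s : List Int) (i : Nat) : (loopAF fuel s i).length = s.length := by
  induction fuel generalizing s i with
  | zero => rfl
  | succ fuel ih =>
      rw [loopAF]
      split
      · split
        · rw [ih, setRangeA_length]
        · rw [ih]
      · rfl

theorem loopA_length (s : List Int) (i : Nat) : (loopA s i).length = s.length :=
  loopAF_length _ s i

theorem loopAF_getD (fuel : Nat) (tones s : List Int) (i : Nat)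
    (hf : s.length ≤ i + fuel)
    (hlen : s.length = tones.length)
    (hlo : ∀ j, j < i → s.getD j 0 = tgtS tones j)
    (hhi : ∀ j, i ≤ j → s.getD j 0 = tones.getD j 0) :
    ∀ j, j < s.length → (loopAF fuel s i).getD j 0 = tgtS tones j := by
  induction fuel generalizing s i with
  | zero =>
      intro j hj
      rw [loopAF]
      exact hlo j (by omega)
  | succ fuel ih =>
      rw [loopAF]
      by_cases h1 : i < s.length
      · rw [if_pos h1]
        by_cases h2 : s.getD i 0 = 3
        · rw [if_pos h2]
          set re := runEndA s (i + 1) with hre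
          have hspec := runEndA_spec s (i + 1)
          have hge := runEndA_ge s (i + 1)
          have hrun : ∀ j, i ≤ j → j < re → j < s.length ∧ tones.getD j 0 = 3 := by
            intro j hj1 hj2
            rcases Nat.eq_or_lt_of_le hj1 with rfl | hlt
            · exact ⟨h1, by rw [← hhi _ le_rfl]; exact h2⟩
            · obtain ⟨ha, hb⟩ := hspec.1 j hlt hj2
              exact ⟨ha, by rw [← hhi j hj1]; exact hb⟩
          have hend : ¬(re < s.length ∧ tones.getD re 0 = 3) := by
            intro ⟨ha, hb⟩
            exact hspec.2 ⟨ha, by rw [hhi re (by omega)]; exact hb⟩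
          intro j hj
          rw [← setRangeA_length s i (re - 1)] at hj
          refine ih (setRangeA s i (re - 1)) re ?_ ?_ ?_ ?_ j hj
          · rw [setRangeA_length]; omega
          · rw [setRangeA_length]; exact hlen
          · intro j hj
            rw [setRangeA_getD]
            by_cases hji : j < i
            · rw [if_neg (by omega), hlo j hji]
            · have hj1 : i ≤ j := by omega
              have hjlen : j < s.length := (hrun j hj1 (by omega)).1
              by_cases hjl : j < re - 1
              · rw [if_pos ⟨hj1, hjl, hjlen⟩]
                have ht1 : tones.getD j 0 = 3 := (hrun j hj1 (by omega)).2
                have ht2 : tones.getD (j + 1) 0 = 3 := (hrun (j + 1) (by omega) (by omega)).2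
                have hl2 : j + 1 < s.length := (hrun (j + 1) (by omega) (by omega)).1
                unfold tgtS
                rw [if_pos ⟨ht1, by omega, ht2⟩]
              · have hjre : j = re - 1 := by omega
                rw [if_neg (by omega)]
                have ht1 : tones.getD j 0 = 3 := (hrun j hj1 (by omega)).2
                have hs : s.getD j 0 = tones.getD j 0 := hhi j hj1
                have hj1re : j + 1 = re := by omega
                unfold tgtS
                rw [hs, ht1, if_neg]
                rintro ⟨-, hb, hc⟩
                rw [hj1re] at hb hc
                exact hend ⟨by omega, hc⟩
          · intro j hj
            rw [setRangeA_getD, if_neg (by omega)]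
            exact hhi j (by omega)
        · rw [if_neg h2]
          refine ih s (i + 1) (by omega) hlen ?_ ?_
          · intro j hj
            rcases Nat.lt_succ_iff_lt_or_eq.mp hj with hlt | rfl
            · exact hlo j hlt
            · have hs : s.getD j 0 = tones.getD j 0 := hhi j le_rfl
              unfold tgtS
              rw [hs, if_neg]
              rintro ⟨ha, -, -⟩
              exact h2 (by rw [hs]; exact ha)
          · intro j hj
            exact hhi j (by omega)
      · rw [if_neg h1]
        intro j hj
        exact hlo j (by omega)

theorem loopA_getD (tones s : List Int) (i : Nat)
    (hlen : s.length = tones.length)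
    (hlo : ∀ j, j < i → s.getD j 0 = tgtS tones j)
    (hhi : ∀ j, i ≤ j → s.getD j 0 = tones.getD j 0) :
    ∀ j, j < s.length → (loopA s i).getD j 0 = tgtS tones j :=
  loopAF_getD (s.length - i) tones s i (by omega) hlen hlo hhi

-- B''s surface list, pointwise
theorem alt_surface_getD (tones : List Int) (j : Nat) (hj : j < tones.length) :
    ((PySem.List.enumerate tones).map (fun p =>
        if p.2 = 3 ∧ p.1 + 1 < (tones.length : Int) ∧ PySem.List.pyGetD tones (p.1 + 1) 0 = 3
        then 2 else p.2)).getD j 0 = tgtS tones j := by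
  have hlen : j < ((PySem.List.enumerate tones).map (fun p =>
        if p.2 = 3 ∧ p.1 + 1 < (tones.length : Int) ∧ PySem.List.pyGetD tones (p.1 + 1) 0 = 3
        then 2 else p.2)).length := by
    simpa [PySem.List.length_enumerate] using hj
  rw [List.getD_eq_getElem _ _ hlen, List.getElem_map, PySem.List.getElem_enumerate]
  simp only [zero_add]
  unfold tgtS
  have hget : tones.getD j 0 = tones[j] := List.getD_eq_getElem _ _ (by simpa using hj)
  by_cases hn : j + 1 < tones.length
  · have hcast : ((j : Int) + 1 < (tones.length : Int)) := by exact_mod_cast hn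
    have hpg : PySem.List.pyGetD tones ((j : Int) + 1) 0 = tones.getD (j + 1) 0 := by
      rw [PySem.List.pyGetD_eq_getElem tones 0 (by omega) (by exact_mod_cast hn)]
      rw [List.getD_eq_getElem _ _ (by simpa using hn)]
      norm_num
    rw [hpg, hget]
    have : ((j : Int) + 1 < (tones.length : Int)) ↔ (j + 1 < tones.length) := by
      constructor <;> intro <;> omega
    simp only [this, hn]
  · have hcast : ¬((j : Int) + 1 < (tones.length : Int)) := by
      intro hc; exact hn (by exact_mod_cast hc)
    rw [hget]
    rw [if_neg (by rintro ⟨-, hb, -⟩; exact hcast hb), if_neg (by rintro ⟨-, hb, -⟩; exact hn hb)]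

-- B''s half_third list, pointwise
theorem alt_half_getD (tones : List Int) (j : Nat) (hj : j < tones.length) :
    ((PySem.List.enumerate tones).map (fun p =>
        decide (p.2 = 3 ∧ p.1 + 1 < (tones.length : Int) ∧ PySem.List.pyGetD tones (p.1 + 1) 0 ≠ 3))).getD j false
      = decide (tones.getD j 0 = 3 ∧ j + 1 < tones.length ∧ tones.getD (j + 1) 0 ≠ 3) := by
  have hlen : j < ((PySem.List.enumerate tones).map (fun p =>
        decide (p.2 = 3 ∧ p.1 + 1 < (tones.length : Int) ∧ PySem.List.pyGetD tones (p.1 + 1) 0 ≠ 3))).length := by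
    simpa [PySem.List.length_enumerate] using hj
  rw [List.getD_eq_getElem _ _ hlen, List.getElem_map, PySem.List.getElem_enumerate]
  simp only [zero_add]
  have hget : tones.getD j 0 = tones[j] := List.getD_eq_getElem _ _ (by simpa using hj)
  by_cases hn : j + 1 < tones.length
  · have hpg : PySem.List.pyGetD tones ((j : Int) + 1) 0 = tones.getD (j + 1) 0 := by
      rw [PySem.List.pyGetD_eq_getElem tones 0 (by omega) (by exact_mod_cast hn)]
      rw [List.getD_eq_getElem _ _ (by simpa using hn)]
      norm_num
    rw [hpg, hget]
    have heq : ((j : Int) + 1 < (tones.length : Int)) ↔ (j + 1 < tones.length) := by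
      constructor <;> intro <;> omega
    simp only [heq]
  · have hcast : ¬((j : Int) + 1 < (tones.length : Int)) := by
      intro hc; exact hn (by exact_mod_cast hc)
    rw [hget]
    simp only [decide_eq_decide]
    constructor
    · rintro ⟨-, hb, -⟩; exact absurd hb hcast
    · rintro ⟨-, hb, -⟩; exact absurd hb hn

-- A''s half_third foldl, pointwise
theorem half_foldl (tones : List Int) (m : Nat) (hf : List Bool) (hlen : hf.length = tones.length) :
    ((List.range m).foldl
      (fun hf i =>
        if tones.getD i 0 = 3 ∧ i < tones.length - 1 ∧ tones.getD (i + 1) 0 ≠ 3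
        then hf.set i true else hf) hf).length = tones.length ∧
    ∀ j, ((List.range m).foldl
      (fun hf i =>
        if tones.getD i 0 = 3 ∧ i < tones.length - 1 ∧ tones.getD (i + 1) 0 ≠ 3
        then hf.set i true else hf) hf).getD j false =
      if j < m ∧ tones.getD j 0 = 3 ∧ j < tones.length - 1 ∧ tones.getD (j + 1) 0 ≠ 3
      then true else hf.getD j false := by
  induction m with
  | zero => exact ⟨hlen, fun j => by simp⟩
  | succ m ih =>
      obtain ⟨ih1, ih2⟩ := ih
      rw [List.range_succ, List.foldl_append]
      simp only [List.foldl_cons, List.foldl_nil]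
      set l := (List.range m).foldl
        (fun hf i =>
          if tones.getD i 0 = 3 ∧ i < tones.length - 1 ∧ tones.getD (i + 1) 0 ≠ 3
          then hf.set i true else hf) hf with hl
      constructor
      · split
        · rw [List.length_set]; exact ih1
        · exact ih1
      · intro j
        by_cases hc : tones.getD m 0 = 3 ∧ m < tones.length - 1 ∧ tones.getD (m + 1) 0 ≠ 3
        · rw [if_pos hc]
          have hml : m < l.length := by omega
          by_cases hjm : j = m
          · subst hjm
            rw [List.getD_eq_getElem _ _ (by simpa [List.length_set] using hml)]
            rw [List.getElem_set_self]
            rw [if_pos ⟨by omega, hc⟩]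
          · have hset : (l.set m true).getD j false = l.getD j false := by
              rw [getD_set_eq, if_neg (by rintro ⟨ha, -⟩; exact hjm ha.symm)]
            rw [hset, ih2 j]
            have : ¬(j = m) := hjm
            split_ifs with p1 p2 p2 <;> try rfl
            · exfalso; omega
            · exfalso; omega
        · rw [if_neg hc, ih2 j]
          by_cases p : j < m ∧ tones.getD j 0 = 3 ∧ j < tones.length - 1 ∧ tones.getD (j + 1) 0 ≠ 3
          · rw [if_pos p, if_pos ⟨by omega, p.2⟩]
          · rw [if_neg p, if_neg ?_]
            rintro ⟨hq1, hq2⟩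
            by_cases hjm : j = m
            · subst hjm; exact hc hq2
            · exact p ⟨by omega, hq2⟩

-- ===== VERDICT (by name: the statement is the Claim_ definition above) =====
theorem apply_sandhi_rules_py_spec : Claim_equal_apply_sandhi_rules_py := by
  intro tones _
  unfold Spec_apply_sandhi_rules_py apply_sandhi_rules_py apply_sandhi_rules_py_alt
  by_cases hsmall : tones.length < 2
  · rw [if_pos hsmall]
    match tones, hsmall with
    | [], _ => simp [PySem.List.enumerate]
    | [a], _ =>
        simp only [PySem.List.enumerate, List.map, List.length_cons, List.length_nil]
        norm_num
  · rw [if_neg hsmall]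
    refine Prod.ext ?_ (Prod.ext rfl ?_)
    · -- surface
      apply ext_getD (0 : Int)
      · rw [loopA_length]
        simp [PySem.List.length_enumerate]
      · intro j hj
        rw [loopA_length] at hj
        rw [loopA_getD tones tones 0 rfl (by omega) (fun j _ => rfl) j hj]
        exact (alt_surface_getD tones j hj).symm
    · -- half_third
      apply ext_getD false
      · rw [(half_foldl tones tones.length (List.replicate tones.length false) (by simp)).1]
        simp [PySem.List.length_enumerate]
      · intro j hj
        rw [(half_foldl tones tones.length (List.replicate tones.length false) (by simp)).1] at hj
        rw [(half_foldl tones tones.length (List.replicate tones.length false) (by simp)).2 j]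
        rw [alt_half_getD tones j hj]
        have hrep : (List.replicate tones.length false).getD j false = false := by
          simp [List.getD_eq_getElem?_getD, hj]
        rw [hrep]
        by_cases hc : tones.getD j 0 = 3 ∧ j + 1 < tones.length ∧ tones.getD (j + 1) 0 ≠ 3
        · rw [if_pos ⟨hj, hc.1, by omega, hc.2.2⟩]
          exact (decide_eq_true hc).symm
        · rw [if_neg (by rintro ⟨-, h1, h2, h3⟩; exact hc ⟨h1, by omega, h3⟩)]
          exact (decide_eq_false hc).symm
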